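-- pv_equiv track=rewrite | github.com/aajanki/yoda-translator | yoda/yoda.py | _join_with_spaces
-- ===== SOURCE A (Python) =====
-- def _join_with_spaces(sentences):
--     res = []
--     needs_whitespace = False
--     for s in sentences:
--         if needs_whitespace and s and not s[0].isspace():
--             res.append(' ')
--
--         res.append(s)
--
--         if s:
--             needs_whitespace = not s[-1].isspace()
--
--     return ''.join(res)
-- ===== SOURCE B (Python) =====
-- def _join_with_spaces(sentences):
--     parts = [s for s in sentences if s]
--     if not parts:
--         return ''
--     out = [parts[0]]
--     for prev, cur in zip(parts, parts[1:]):
--         if not prev[-1].isspace() and not cur[0].isspace():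
--             out.append(' ')
--         out.append(cur)
--     return ''.join(out)
-- ===== Notes on version B (the rewrite author's own statement) =====
-- stated objective: simpler
-- what changed: Replaces the running needs_whitespace state flag with a stateless pairwise pass over adjacent pairs of the empty-filtered list (empty strings are transparent to both output and boundary state).
import Mathlib
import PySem

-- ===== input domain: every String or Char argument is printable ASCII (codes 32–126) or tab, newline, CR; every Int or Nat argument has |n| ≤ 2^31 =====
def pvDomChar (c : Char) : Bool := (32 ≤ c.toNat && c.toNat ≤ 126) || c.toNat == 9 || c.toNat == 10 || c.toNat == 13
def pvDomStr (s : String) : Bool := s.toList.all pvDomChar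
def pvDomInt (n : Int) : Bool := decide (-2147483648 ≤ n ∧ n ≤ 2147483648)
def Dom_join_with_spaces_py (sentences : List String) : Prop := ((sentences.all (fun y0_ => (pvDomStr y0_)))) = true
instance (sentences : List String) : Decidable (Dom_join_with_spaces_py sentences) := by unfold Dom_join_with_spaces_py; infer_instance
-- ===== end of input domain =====

-- B replaces A's running needs_whitespace flag with a stateless pairwise pass over
-- adjacent pairs of the empty-filtered list (objective: simpler).

-- s[0].isspace() on a nonempty string s (ported by hand; exact: the first code point's isspace)
def pvFirstSp (s : String) : Bool :=
  match s.toList with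
  | [] => false
  | c :: _ => PySem.Chars.isspace c

-- s[-1].isspace() on a nonempty string s (ported by hand; exact: the last code point's isspace)
def pvLastSp (s : String) : Bool :=
  match s.toList.getLast? with
  | none => false
  | some c => PySem.Chars.isspace c

-- ===== PORT A =====
-- the for-loop of A over state (res, needs_whitespace)
def loopA (res : List String) (nw : Bool) : List String → List String
  | [] => res
  | s :: rest =>
    loopA ((if nw && !(s == "") && !pvFirstSp s then res ++ [" "] else res) ++ [s])
          (if !(s == "") then !pvLastSp s else nw) rest

def join_with_spaces_py (sentences : List String) : String :=
  PySem.Str.join "" (loopA [] false sentences)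

-- ===== PORT B =====
-- the for-loop of B over zip(parts, parts[1:])
def loopB (out : List String) : List (String × String) → List String
  | [] => out
  | (prev, cur) :: rest =>
    loopB ((if !pvLastSp prev && !pvFirstSp cur then out ++ [" "] else out) ++ [cur]) rest

def join_with_spaces_py_alt (sentences : List String) : String :=
  let parts := sentences.filter (fun s => s != "")
  match parts with
  | [] => ""
  | p0 :: rest => PySem.Str.join "" (loopB [p0] (List.zip (p0 :: rest) rest))

-- ===== PRECONDITION & SPEC =====
def Spec_join_with_spaces_py (sentences : List String) (out : String) : Prop := out = join_with_spaces_py_alt sentences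
instance (sentences : List String) (out : String) : Decidable (Spec_join_with_spaces_py sentences out) := by unfold Spec_join_with_spaces_py; infer_instance

-- ===== CLAIM (what is proved, stated in full; the proofs are below) =====
def Claim_equal_join_with_spaces_py : Prop := ∀ (sentences : List String), Dom_join_with_spaces_py sentences → Spec_join_with_spaces_py sentences (join_with_spaces_py sentences)

-- ===== LEMMAS AND PROOFS =====

-- ''.join as char-list concatenation
def pvJ (l : List String) : List Char := (l.map String.toList).flatten

theorem chars_join_nil_flatten (xs : List (List Char)) : PySem.Chars.join [] xs = xs.flatten := by
  induction xs with
  | nil => simp [PySem.Chars.join_nil]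
  | cons p rest ih =>
    cases rest with
    | nil => simp [PySem.Chars.join_singleton]
    | cons q r =>
      rw [PySem.Chars.join_cons_cons, ih]
      simp

theorem join_eq_pvJ (l : List String) : (PySem.Str.join "" l).toList = pvJ l := by
  rw [PySem.Str.toList_join]
  show PySem.Chars.join "".toList (l.map String.toList) = pvJ l
  rw [show "".toList = ([] : List Char) from rfl, chars_join_nil_flatten]
  rfl

theorem pvJ_append (a b : List String) : pvJ (a ++ b) = pvJ a ++ pvJ b := by
  simp [pvJ]

theorem loopA_acc (l : List String) (res : List String) (nw : Bool) :
    loopA res nw l = res ++ loopA [] nw l := by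
  induction l generalizing res nw with
  | nil => simp [loopA]
  | cons s rest ih =>
    rw [loopA, loopA, ih, ih (res := (if nw && !(s == "") && !pvFirstSp s then [] ++ [" "] else []) ++ [s])]
    by_cases h : (nw && !(s == "") && !pvFirstSp s) = true <;> simp [h]

theorem loopB_acc (l : List (String × String)) (out : List String) :
    loopB out l = out ++ loopB [] l := by
  induction l generalizing out with
  | nil => simp [loopB]
  | cons pc rest ih =>
    obtain ⟨prev, cur⟩ := pc
    rw [loopB, loopB, ih, ih (out := (if !pvLastSp prev && !pvFirstSp cur then [] ++ [" "] else []) ++ [cur])]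
    by_cases h : (!pvLastSp prev && !pvFirstSp cur) = true <;> simp [h]

-- empty strings are transparent: same joined output as on the empty-filtered list
-- one unfolding step of A's loop, at the joined-chars level
theorem loopA_cons_J (s : String) (t : List String) (nw : Bool) :
    pvJ (loopA [] nw (s :: t)) =
      (if nw && !(s == "") && !pvFirstSp s then [' '] else []) ++ s.toList
        ++ pvJ (loopA [] (if !(s == "") then !pvLastSp s else nw) t) := by
  rw [loopA, loopA_acc]
  by_cases h : (nw && !(s == "") && !pvFirstSp s) = true <;> simp [h, pvJ]

-- empty strings are transparent: same joined output as on the empty-filtered list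
theorem loopA_filter (l : List String) (nw : Bool) :
    pvJ (loopA [] nw l) = pvJ (loopA [] nw (l.filter (fun s => s != ""))) := by
  induction l generalizing nw with
  | nil => rfl
  | cons s rest ih =>
    by_cases hs : s = ""
    · subst hs
      rw [loopA_cons_J]
      simp only [List.filter_cons]
      norm_num
      simpa using ih nw
    · have hb : (s == "") = false := by simp [hs]
      simp only [List.filter_cons]
      norm_num
      rw [if_neg hs, loopA_cons_J, loopA_cons_J, ih]

-- on a list of nonempty strings, B's pairwise pass equals A's flag-driven pass
theorem loopB_eq_loopA (l : List String) (p : String) (h : ∀ s ∈ l, s ≠ "") :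
    loopB [] (List.zip (p :: l) l) = loopA [] (!pvLastSp p) l := by
  induction l generalizing p with
  | nil => rfl
  | cons s rest ih =>
    have hs : (s == "") = false := by simp [h s (by simp)]
    show loopB [] ((p, s) :: List.zip (s :: rest) rest) = loopA [] (!pvLastSp p) (s :: rest)
    rw [loopB, loopB_acc]
    simp only [loopA]
    rw [loopA_acc, hs, ih s (fun t ht => h t (by simp [ht]))]
    simp

-- ===== VERDICT (by name: the statement is the Claim_ definition above) =====
theorem join_with_spaces_py_spec : Claim_equal_join_with_spaces_py := by
  intro l _hdom
  show join_with_spaces_py l = join_with_spaces_py_alt l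
  rw [← String.toList_inj]
  unfold join_with_spaces_py join_with_spaces_py_alt
  cases hp : l.filter (fun s => s != "") with
  | nil =>
    simp only
    rw [join_eq_pvJ, loopA_filter l false, hp]
    rfl
  | cons p0 rest =>
    have hmem : ∀ s ∈ p0 :: rest, s ≠ "" := by
      intro s hs
      have := List.of_mem_filter (p := fun s => s != "") (by rw [hp]; exact hs)
      simpa using this
    have hp0 : (p0 == "") = false := by simp [hmem p0 (by simp)]
    simp only
    rw [join_eq_pvJ, join_eq_pvJ, loopA_filter l false, hp, loopA_cons_J, loopB_acc, pvJ_append]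
    rw [loopB_eq_loopA rest p0 (fun t ht => hmem t (by simp [ht]))]
    simp [hp0, pvJ]
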